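-- pv_equiv track=rewrite | github.com/JaviMaligno/Las12uvas2022 | 4. Doblando calcetines/solution.py | no_emparejados
-- ===== SOURCE A (Python) =====
-- from collections import defaultdict
--
-- def no_emparejados(calcetines):
--     vistos = defaultdict(bool)
--     max_no_emparejados = 0
--     actual_no_emparejados = 0
--     for calcetin in calcetines:
--         actual_no_emparejados -= 1 if vistos[calcetin] else -1
--         vistos[calcetin] = not vistos[calcetin]
--         max_no_emparejados = max(max_no_emparejados, actual_no_emparejados)
--     return max_no_emparejados
-- ===== SOURCE B (Python) =====
-- def no_emparejados(calcetines):
--     # Phase 1: turn the stream into a +1/-1 "unpaired socks" signal using a set.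
--     sin_par = set()
--     deltas = []
--     for c in calcetines:
--         if c in sin_par:
--             sin_par.remove(c)
--             deltas.append(-1)
--         else:
--             sin_par.add(c)
--             deltas.append(1)
--     # Phase 2: the answer is the maximum prefix sum of the signal (0 included).
--     prefijos = [0]
--     for d in deltas:
--         prefijos.append(prefijos[-1] + d)
--     return max(prefijos)
-- ===== Notes on version B (the rewrite author's own statement) =====
-- stated objective: alternative
-- what changed: A fuses parity tracking (defaultdict of booleans) with an online running-max in one loop; B first builds a +1/-1 delta signal from a set of currently-unpaired socks, then separately takes the maximum over the prefix sums of that signal.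
import Mathlib
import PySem

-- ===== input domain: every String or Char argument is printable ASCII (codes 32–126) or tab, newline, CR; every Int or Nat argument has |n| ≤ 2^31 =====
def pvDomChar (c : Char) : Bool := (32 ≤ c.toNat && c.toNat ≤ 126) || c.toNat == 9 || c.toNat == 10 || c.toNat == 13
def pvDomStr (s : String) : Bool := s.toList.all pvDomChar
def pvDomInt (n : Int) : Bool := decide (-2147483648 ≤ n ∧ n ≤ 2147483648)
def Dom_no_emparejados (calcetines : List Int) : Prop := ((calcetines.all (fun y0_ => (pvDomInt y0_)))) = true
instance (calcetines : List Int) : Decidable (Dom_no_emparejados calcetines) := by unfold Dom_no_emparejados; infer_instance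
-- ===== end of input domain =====

-- B replaces A's fused parity-dict + online-max loop by two phases: build a ±1 delta signal
-- from a set of currently-unpaired socks, then take the maximum prefix sum of that signal.


-- ===== PORT A =====
-- state: (vistos, actual_no_emparejados, max_no_emparejados)
def pvStepA (st : PySem.Dict Int Bool × Int × Int) (calcetin : Int) : PySem.Dict Int Bool × Int × Int :=
  let b := st.1.getD calcetin false            -- defaultdict(bool) lookup
  let actual := st.2.1 - (if b then 1 else -1)
  (st.1.insert calcetin (!b), actual, max st.2.2 actual)

def no_emparejados (calcetines : List Int) : Int :=
  (calcetines.foldl pvStepA (PySem.Dict.empty, 0, 0)).2.2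

-- ===== PORT B =====
-- state: (sin_par, deltas); sin_par.remove(c) under the membership guard is exact as Set.discard
def pvStepB (st : PySem.Set Int × List Int) (c : Int) : PySem.Set Int × List Int :=
  if PySem.Set.contains st.1 c then (PySem.Set.discard st.1 c, st.2 ++ [(-1 : Int)])
  else (PySem.Set.add st.1 c, st.2 ++ [(1 : Int)])

def no_emparejados_alt (calcetines : List Int) : Int :=
  let deltas := (calcetines.foldl pvStepB (PySem.Set.empty, [])).2
  -- prefijos[-1] always exists (prefijos starts as [0]); .getD 0 only makes the lookup total
  let prefijos := deltas.foldl (fun acc d => acc ++ [(PySem.List.pyGet? acc (-1)).getD 0 + d]) [(0 : Int)]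
  (PySem.List.max? prefijos (fun x => x)).getD 0

-- ===== PRECONDITION & SPEC =====
def Spec_no_emparejados (calcetines : List Int) (out : Int) : Prop := out = no_emparejados_alt calcetines
instance (calcetines : List Int) (out : Int) : Decidable (Spec_no_emparejados calcetines out) := by unfold Spec_no_emparejados; infer_instance

-- ===== CLAIM (what is proved, stated in full; the proofs are below) =====
def Claim_equal_no_emparejados : Prop := ∀ (calcetines : List Int), Dom_no_emparejados calcetines → Spec_no_emparejados calcetines (no_emparejados calcetines)

-- ===== LEMMAS AND PROOFS =====

-- the delta signal B's first loop produces, as a structural recursion (proof-side only)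
def pvDRec (S : PySem.Set Int) : List Int → List Int
  | [] => []
  | c :: cs =>
    if PySem.Set.contains S c then (-1) :: pvDRec (PySem.Set.discard S c) cs
    else 1 :: pvDRec (PySem.Set.add S c) cs

-- prefix sums of a delta list starting from cur (proof-side only)
def pvScan (cur : Int) : List Int → List Int
  | [] => []
  | d :: ds => (cur + d) :: pvScan (cur + d) ds

theorem pvStepB_snd (rest : List Int) (S : PySem.Set Int) (acc : List Int) :
    (rest.foldl pvStepB (S, acc)).2 = acc ++ pvDRec S rest := by
  induction rest generalizing S acc with
  | nil => simp [pvDRec]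
  | cons c cs ih =>
    by_cases h : c ∈ S
    · simp [pvStepB, pvDRec, h, ih]
    · simp [pvStepB, pvDRec, h, ih]

theorem pvGetLast_append (ys : List Int) (a : Int) :
    PySem.List.pyGet? (ys ++ [a]) (-1) = some a := by
  simp [PySem.List.pyGet?, PySem.List.pyIdx?]

theorem pvPrefFold (ds acc : List Int) (last : Int)
    (h : PySem.List.pyGet? acc (-1) = some last) :
    ds.foldl (fun acc d => acc ++ [(PySem.List.pyGet? acc (-1)).getD 0 + d]) acc
      = acc ++ pvScan last ds := by
  induction ds generalizing acc last with
  | nil => simp [pvScan]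
  | cons d ds ih =>
    simp only [List.foldl_cons, h, Option.getD_some, pvScan]
    rw [ih (acc ++ [last + d]) (last + d) (pvGetLast_append acc (last + d))]
    simp

theorem pvMax?Cons (l : List Int) : ∀ m : Int,
    (PySem.List.max? (m :: l) (fun x => x)).getD 0 = l.foldl max m := by
  induction l with
  | nil => intro m; rfl
  | cons x xs ih =>
    intro m
    have h : PySem.List.max? (m :: x :: xs) (fun x => x)
        = PySem.List.max? (max m x :: xs) (fun x => x) := by
      simp only [PySem.List.max?, List.foldl_cons]
      congr 1
      show (if m < x then some x else some m) = some (max m x)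
      rcases lt_or_ge m x with h | h
      · simp [h, max_eq_right (le_of_lt h)]
      · simp [not_lt.mpr h, max_eq_left h]
    rw [h, ih (max m x)]
    rfl

theorem pvMainA (rest : List Int) (vistos : PySem.Dict Int Bool) (S : PySem.Set Int)
    (cur mx : Int)
    (hinv : ∀ k, vistos.getD k false = true ↔ k ∈ S) :
    (rest.foldl pvStepA (vistos, cur, mx)).2.2
      = (pvScan cur (pvDRec S rest)).foldl max mx := by
  induction rest generalizing vistos S cur mx with
  | nil => simp [pvDRec, pvScan]
  | cons c cs ih =>
    by_cases hc : c ∈ S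
    · have hb : vistos.getD c false = true := (hinv c).mpr hc
      have hcon : PySem.Set.contains S c = true := (PySem.Set.contains_iff S c).mpr hc
      have hinv' : ∀ k, (vistos.insert c false).getD k false = true ↔ k ∈ PySem.Set.discard S c := by
        intro k
        rw [PySem.Dict.getD_insert, PySem.Set.mem_discard]
        by_cases hk : k = c
        · simp [hk]
        · simp [hk, hinv k]
      simp only [List.foldl_cons, pvStepA, hb, pvDRec, hcon, if_true, pvScan, List.foldl_cons]
      have := ih (vistos.insert c false) (PySem.Set.discard S c) (cur - 1) (max mx (cur - 1)) hinv'
      simpa [show cur + -1 = cur - 1 by ring] using this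
    · have hb : vistos.getD c false = false := by
        cases h : vistos.getD c false
        · rfl
        · exact absurd ((hinv c).mp h) hc
      have hcon : PySem.Set.contains S c = false := by
        cases h : PySem.Set.contains S c
        · rfl
        · exact absurd ((PySem.Set.contains_iff S c).mp h) hc
      have hinv' : ∀ k, (vistos.insert c true).getD k false = true ↔ k ∈ PySem.Set.add S c := by
        intro k
        rw [PySem.Dict.getD_insert, PySem.Set.mem_add]
        by_cases hk : k = c
        · simp [hk]
        · simp [hk, hinv k]
      simp only [List.foldl_cons, pvStepA, hb, pvDRec, hcon, List.foldl_cons]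
      have := ih (vistos.insert c true) (PySem.Set.add S c) (cur + 1) (max mx (cur + 1)) hinv'
      simpa [show cur - -1 = cur + 1 by ring] using this

-- ===== VERDICT (by name: the statement is the Claim_ definition above) =====
theorem no_emparejados_spec : Claim_equal_no_emparejados := by
  intro calcetines _
  show no_emparejados calcetines = no_emparejados_alt calcetines
  unfold no_emparejados no_emparejados_alt
  rw [pvStepB_snd]
  simp only [List.nil_append]
  rw [pvPrefFold (pvDRec PySem.Set.empty calcetines) [(0 : Int)] 0 (by decide)]
  rw [show ([(0 : Int)] ++ pvScan 0 (pvDRec PySem.Set.empty calcetines))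
      = (0 : Int) :: pvScan 0 (pvDRec PySem.Set.empty calcetines) from rfl]
  rw [pvMax?Cons _ 0]
  exact pvMainA calcetines PySem.Dict.empty PySem.Set.empty 0 0
    (by intro k; simp [PySem.Dict.getD_empty, PySem.Set.empty])
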